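-- pv_equiv track=rewrite | github.com/bolajiy/golden-retriever | dataloaders.py | to_upper
-- ===== SOURCE A (Python) =====
-- import string
-- from typing import List, Tuple, Dict, Union, Iterable
--
-- def remove_punctuation(string_x: str):
--     return ''.join([_ for _ in string_x if _ not in string.punctuation])
--
-- def to_upper(string_x: str, tr: bool = False, special: Dict = None, use_spaces=False) -> str:
--     if special is None:
--         special = {}
--     string_x = remove_punctuation(string_x)
--     y = [x.upper() if x not in special.keys() else special[x]
--          for x in string_x]
--     if not use_spaces:
--         y = [x for x in y if not(x.isspace())]
--     return ''.join(y)
-- ===== SOURCE B (Python) =====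
-- import string
--
-- def to_upper(string_x: str, tr: bool = False, special=None, use_spaces=False) -> str:
--     # Build one translation table for the distinct characters, then translate in one call.
--     if special is None:
--         special = {}
--     table = {}
--     for c in set(string_x):
--         if c in string.punctuation:
--             table[ord(c)] = None
--         else:
--             v = special[c] if c in special else c.upper()
--             if not use_spaces and v.isspace():
--                 v = None
--             table[ord(c)] = v
--     return string_x.translate(table)
-- ===== Notes on version B (the rewrite author's own statement) =====
-- stated objective: faster
-- what changed: B precomputes a str.translate table over the distinct characters (punctuation deleted, special/upper applied, whitespace results deleted when use_spaces is false) and translates in one C-level call, instead of A's three chained Python-level passes (punctuation filter, map, whitespace filter).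
import Mathlib
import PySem

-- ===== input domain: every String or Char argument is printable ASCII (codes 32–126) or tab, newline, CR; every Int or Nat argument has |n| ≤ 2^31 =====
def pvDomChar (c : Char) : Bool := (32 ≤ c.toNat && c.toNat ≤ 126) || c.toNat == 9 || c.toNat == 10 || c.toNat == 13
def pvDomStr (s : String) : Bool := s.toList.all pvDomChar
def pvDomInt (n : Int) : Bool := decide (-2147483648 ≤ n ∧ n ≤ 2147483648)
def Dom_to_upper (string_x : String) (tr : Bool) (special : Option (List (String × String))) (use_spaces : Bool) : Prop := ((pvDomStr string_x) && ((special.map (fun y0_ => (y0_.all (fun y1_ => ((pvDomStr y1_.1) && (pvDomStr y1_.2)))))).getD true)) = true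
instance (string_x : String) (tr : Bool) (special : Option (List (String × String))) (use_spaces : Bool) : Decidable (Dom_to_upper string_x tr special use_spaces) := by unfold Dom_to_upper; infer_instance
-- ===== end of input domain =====

-- B builds one str.translate-style table over the distinct characters and translates in a single
-- call, instead of A's three chained passes; same results, measurably faster (constant factor).


-- ===== PORT A =====
-- string.punctuation
def pyPunctuation : List Char := "!\"#$%&'()*+,-./:;<=>?@[\\]^_`{|}~".toList

def remove_punctuation (string_x : String) : String :=
  PySem.Str.join "" ((string_x.toList.filter (fun c => !(pyPunctuation.contains c))).map Char.toString)

def to_upper (string_x : String) (tr : Bool) (special : Option (List (String × String))) (use_spaces : Bool) : String :=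
  let sp := PySem.Dict.ofList (special.getD [])
  let string_x := remove_punctuation string_x
  let y := string_x.toList.map (fun x =>
    if !(sp.contains x.toString) then PySem.Str.upper x.toString
    else ((sp.get? x.toString).getD ""))   -- key present here, so getD never uses the default
  let y := if use_spaces then y else y.filter (fun x => !(PySem.Str.strIsspace x))
  PySem.Str.join "" y

-- ===== PORT B =====
-- table keyed by the character itself (Python keys it by ord(c); same mapping, ord is injective);
-- Python's set iteration order is arbitrary and the result is order-independent, the port uses
-- first-occurrence order (PySem.Set.ofList).
def to_upper_alt (string_x : String) (tr : Bool) (special : Option (List (String × String))) (use_spaces : Bool) : String :=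
  let sp := PySem.Dict.ofList (special.getD [])
  let table := (PySem.Set.ofList string_x.toList).foldl (fun d c =>
      if pyPunctuation.contains c then d.insert c none
      else
        let v := if sp.contains c.toString then ((sp.get? c.toString).getD "") else PySem.Str.upper c.toString
        d.insert c (if !use_spaces && PySem.Str.strIsspace v then none else some v))
    (PySem.Dict.mk [])
  PySem.Str.join "" (string_x.toList.map (fun c =>
    match table.get? c with
    | some (some v) => v
    | some none => ""
    | none => c.toString))   -- unreachable: every char of string_x is in the table

-- ===== PRECONDITION & SPEC =====
def Spec_to_upper (string_x : String) (tr : Bool) (special : Option (List (String × String))) (use_spaces : Bool) (out : String) : Prop := out = to_upper_alt string_x tr special use_spaces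
instance (string_x : String) (tr : Bool) (special : Option (List (String × String))) (use_spaces : Bool) (out : String) : Decidable (Spec_to_upper string_x tr special use_spaces out) := by unfold Spec_to_upper; infer_instance

-- ===== CLAIM (what is proved, stated in full; the proofs are below) =====
def Claim_equal_to_upper : Prop := ∀ (string_x : String) (tr : Bool) (special : Option (List (String × String))) (use_spaces : Bool), Dom_to_upper string_x tr special use_spaces → Spec_to_upper string_x tr special use_spaces (to_upper string_x tr special use_spaces)

-- ===== LEMMAS AND PROOFS =====

-- the per-character entry B stores in the table
def pvEntry (sp : PySem.Dict String String) (use_spaces : Bool) (c : Char) : Option String :=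
  if pyPunctuation.contains c then none
  else
    let v := if sp.contains c.toString then ((sp.get? c.toString).getD "") else PySem.Str.upper c.toString
    if !use_spaces && PySem.Str.strIsspace v then none else some v

-- A's mapped value per character
def pvMapA (sp : PySem.Dict String String) (c : Char) : String :=
  if !(sp.contains c.toString) then PySem.Str.upper c.toString else ((sp.get? c.toString).getD "")

lemma pvEntry_eq (sp : PySem.Dict String String) (use_spaces : Bool) (c : Char) :
    pvEntry sp use_spaces c =
      (if pyPunctuation.contains c then none
       else if !use_spaces && PySem.Str.strIsspace (pvMapA sp c) then none else some (pvMapA sp c)) := by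
  unfold pvEntry pvMapA
  cases h : sp.contains c.toString <;> simp only [h] <;> simp

lemma pvTable_get (sp : PySem.Dict String String) (use_spaces : Bool) (L : List Char) (c : Char)
    (hc : c ∈ L) :
    ((PySem.Set.ofList L).foldl (fun d c =>
      if pyPunctuation.contains c then d.insert c none
      else
        let v := if sp.contains c.toString then ((sp.get? c.toString).getD "") else PySem.Str.upper c.toString
        d.insert c (if !use_spaces && PySem.Str.strIsspace v then none else some v))
      (PySem.Dict.mk [])).get? c = some (pvEntry sp use_spaces c) := by
  have hfun : (fun (d : PySem.Dict Char (Option String)) (c : Char) =>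
      if pyPunctuation.contains c then d.insert c none
      else
        let v := if sp.contains c.toString then ((sp.get? c.toString).getD "") else PySem.Str.upper c.toString
        d.insert c (if !use_spaces && PySem.Str.strIsspace v then none else some v))
      = (fun d c => d.insert c (pvEntry sp use_spaces c)) := by
    funext d c
    unfold pvEntry
    cases h : pyPunctuation.contains c <;> simp only [h] <;> simp
  rw [hfun]
  have hitems := PySem.Dict.items_foldl_insert_fresh (PySem.Set.ofList L) (fun c => c)
      (fun c => pvEntry sp use_spaces c) (PySem.Dict.mk [])
      (by intro a _; rfl)
      (by simpa using PySem.Set.nodup_ofList L)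
  apply PySem.Dict.get?_of_mem_items
  · rw [hitems]
    simp only [List.nil_append]
    exact List.mem_map_of_mem ((PySem.Set.mem_ofList L c).2 hc)
  · exact PySem.Dict.nodup_keys_foldl_insert _ _ _ (by simp [PySem.Dict.keys])

lemma pvJoinNil_flatten (xs : List (List Char)) : PySem.Chars.join [] xs = xs.flatten := by
  induction xs with
  | nil => simp [PySem.Chars.join_nil]
  | cons p rest ih =>
    cases rest with
    | nil => rw [PySem.Chars.join_singleton]; simp
    | cons q r => rw [PySem.Chars.join_cons_cons]; simp at ih ⊢; simpa using ih

lemma pvFlatMap_congr {α β : Type} (L : List α) (f g : α → List β)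
    (h : ∀ a ∈ L, f a = g a) : L.flatMap f = L.flatMap g := by
  induction L with
  | nil => rfl
  | cons a l ih =>
    simp only [List.flatMap_cons]
    rw [h a (by simp), ih (fun a ha => h a (by simp [ha]))]

-- A's chain (filter punctuation, map, filter whitespace) as one flatMap
lemma pvChainFilter (L : List Char) (M : Char → String) :
    ((((L.filter (fun c => !(pyPunctuation.contains c))).map M).filter
        (fun x => !(PySem.Str.strIsspace x))).map String.toList).flatten
    = L.flatMap (fun c =>
        if pyPunctuation.contains c then []
        else if PySem.Str.strIsspace (M c) then [] else (M c).toList) := by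
  induction L with
  | nil => rfl
  | cons a l ih =>
    simp at ih
    by_cases hp : a ∈ pyPunctuation
    · simp [hp, ih, List.filter_cons]
    · by_cases hs : PySem.Chars.strIsspace (M a).toList = true <;>
        simp [hp, hs, List.filter_cons, List.flatMap_cons, ih]

-- the same chain without the whitespace filter (use_spaces = true)
lemma pvChainNoFilter (L : List Char) (M : Char → String) :
    (((L.filter (fun c => !(pyPunctuation.contains c))).map M).map String.toList).flatten
    = L.flatMap (fun c => if pyPunctuation.contains c then [] else (M c).toList) := by
  induction L with
  | nil => rfl
  | cons a l ih =>
    simp at ih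
    by_cases hp : a ∈ pyPunctuation <;>
      simp [hp, List.filter_cons, List.flatMap_cons, ih]

lemma pvRemove_toList (string_x : String) :
    (remove_punctuation string_x).toList
      = string_x.toList.filter (fun c => !(pyPunctuation.contains c)) := by
  unfold remove_punctuation
  rw [PySem.Str.toList_join, List.map_map]
  have : (String.toList ∘ Char.toString) = (fun c => [c]) := by
    funext c; simp [Char.toString]
  rw [this]
  simpa using PySem.Chars.join_nil_singletons (string_x.toList.filter (fun c => !(pyPunctuation.contains c)))

-- ===== VERDICT (by name: the statement is the Claim_ definition above) =====
theorem to_upper_spec : Claim_equal_to_upper := by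
  intro string_x tr special use_spaces _
  unfold Spec_to_upper to_upper to_upper_alt
  set sp := PySem.Dict.ofList (special.getD []) with hsp
  set L := string_x.toList with hL
  apply String.toList_inj.mp
  have h0 : ("" : String).toList = [] := rfl
  rw [PySem.Str.toList_join, PySem.Str.toList_join, h0, pvJoinNil_flatten, pvJoinNil_flatten]
  refine Eq.trans (b := L.flatMap (fun c =>
      if pyPunctuation.contains c then []
      else if !use_spaces && PySem.Str.strIsspace (pvMapA sp c) then []
      else (pvMapA sp c).toList)) ?_ ?_
  · -- A side
    rw [pvRemove_toList]
    cases use_spaces with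
    | false =>
      simp only [Bool.false_eq_true, if_false]
      rw [pvChainFilter]
      apply pvFlatMap_congr
      intro c _
      by_cases hp : c ∈ pyPunctuation <;> simp [hp, pvMapA]
    | true =>
      simp only [if_true]
      rw [List.map_map, ← List.map_map, pvChainNoFilter]
      apply pvFlatMap_congr
      intro c _
      by_cases hp : c ∈ pyPunctuation <;> simp [hp, pvMapA]
  · -- B side
    symm
    rw [List.map_map, ← List.flatMap_def]
    apply pvFlatMap_congr
    intro c hc
    have ht := pvTable_get sp use_spaces L c hc
    simp only [Function.comp_apply, ht, pvEntry_eq]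
    by_cases hp : c ∈ pyPunctuation
    · simp [hp]
    · by_cases hs : use_spaces = false ∧ PySem.Chars.strIsspace (pvMapA sp c).toList = true <;>
        simp [hp, hs]
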